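-- pv_equiv track=rewrite | github.com/pkoka888/marketing.tvoje.info | scripts/populate_template_references.py | _find_reference_section
-- ===== SOURCE A (Python) =====
-- def _find_reference_section(
--     content: str
-- ) -> str:
--     """Find reference section in content."""
--     lines = content.split("\n")
--     in_refs = False
--     ref_lines = []
--
--     for line in lines:
--         if (
--             "## References" in line
--             or "## Related Templates" in line
--             or "## Related Skills" in line
--         ):
--             in_refs = True
--             ref_lines.append(line)
--         elif in_refs and (
--             line.startswith("##")
--             or line.strip() == ""
--         ):
--             break
--         elif in_refs:
--             ref_lines.append(line)
--
--     return "\n".join(ref_lines) if ref_lines else ""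
-- ===== SOURCE B (Python) =====
-- def _classify(line: str) -> int:
--     """Tag a line: 1 = marker heading, -1 = section terminator, 0 = body text."""
--     if ("## References" in line
--             or "## Related Templates" in line
--             or "## Related Skills" in line):
--         return 1
--     if line.strip() == "" or line.startswith("##"):
--         return -1
--     return 0
--
--
-- def _find_reference_section(content: str) -> str:
--     """Find reference section in content (tag lines, then slice by indices)."""
--     lines = content.split("\n")
--     tags = [_classify(line) for line in lines]
--     if 1 not in tags:
--         return ""
--     start = tags.index(1)
--     rest = tags[start + 1:]
--     end = start + 1 + rest.index(-1) if -1 in rest else len(lines)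
--     return "\n".join(lines[start:end])
-- ===== Notes on version B (the rewrite author's own statement) =====
-- stated objective: alternative
-- what changed: Replaced A's single-pass boolean state machine that appends lines into an accumulator by a tag-and-slice algorithm: classify every line into marker/terminator/body tags, locate the start and end indices with index() on the tag list, and return the join of one contiguous slice lines[start:end].
import Mathlib
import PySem

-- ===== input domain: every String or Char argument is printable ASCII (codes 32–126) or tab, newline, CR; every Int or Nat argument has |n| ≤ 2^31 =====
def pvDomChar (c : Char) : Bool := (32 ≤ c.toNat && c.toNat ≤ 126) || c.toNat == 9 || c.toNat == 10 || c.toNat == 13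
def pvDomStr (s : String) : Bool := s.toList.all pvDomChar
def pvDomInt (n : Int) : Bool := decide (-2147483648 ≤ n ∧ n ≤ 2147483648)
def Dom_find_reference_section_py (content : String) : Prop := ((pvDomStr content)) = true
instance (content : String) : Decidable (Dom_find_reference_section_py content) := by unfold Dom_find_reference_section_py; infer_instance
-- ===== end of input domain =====

-- B replaces A's single-pass boolean state machine by a tag-and-slice algorithm
-- (classify every line, locate start/end indices on the tag list, join one slice);
-- an alternative decomposition of the same linear cost.

-- ===== PORT A =====
-- A's for-loop with break; state (in_refs, ref_lines)
def pvLoopA : List String → Bool → List String → List String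
  | [], _, acc => acc
  | l :: ls, inRefs, acc =>
    if PySem.Str.isIn "## References" l || PySem.Str.isIn "## Related Templates" l
        || PySem.Str.isIn "## Related Skills" l then
      pvLoopA ls true (acc ++ [l])
    else if inRefs && (PySem.Str.startswith l "##" || PySem.Str.strip l == "") then acc
    else if inRefs then pvLoopA ls inRefs (acc ++ [l])
    else pvLoopA ls inRefs acc

def find_reference_section_py (content : String) : String :=
  let lines := (PySem.Str.split? content "\n").getD []
  let refLines := pvLoopA lines false []
  if refLines.isEmpty then "" else PySem.Str.join "\n" refLines

-- ===== PORT B =====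
-- Source B's _classify: 1 = marker heading, -1 = section terminator, 0 = body text
def pvClassify (line : String) : Int :=
  if PySem.Str.isIn "## References" line || PySem.Str.isIn "## Related Templates" line
      || PySem.Str.isIn "## Related Skills" line then 1
  else if PySem.Str.strip line == "" || PySem.Str.startswith line "##" then -1
  else 0

def find_reference_section_py_alt (content : String) : String :=
  let lines := (PySem.Str.split? content "\n").getD []
  let tags := lines.map pvClassify
  match PySem.List.index? tags 1 with       -- '1 not in tags' / 'start = tags.index(1)'
  | none => ""
  | some start =>
    let rest := PySem.List.slice tags (some ((start : Int) + 1)) none   -- tags[start+1:]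
    let endIdx : Nat :=
      match PySem.List.index? rest (-1) with   -- '-1 in rest' / 'rest.index(-1)'
      | some j => start + 1 + j
      | none => lines.length
    PySem.Str.join "\n" (PySem.List.slice lines (some (start : Int)) (some (Int.ofNat endIdx)))

-- ===== PRECONDITION & SPEC =====
def Spec_find_reference_section_py (content : String) (out : String) : Prop := out = find_reference_section_py_alt content
instance (content : String) (out : String) : Decidable (Spec_find_reference_section_py content out) := by unfold Spec_find_reference_section_py; infer_instance

-- ===== CLAIM (what is proved, stated in full; the proofs are below) =====
def Claim_equal_find_reference_section_py : Prop := ∀ (content : String), Dom_find_reference_section_py content → Spec_find_reference_section_py content (find_reference_section_py content)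

-- ===== LEMMAS AND PROOFS =====

def pvMarker (l : String) : Bool :=
  PySem.Str.isIn "## References" l || PySem.Str.isIn "## Related Templates" l
    || PySem.Str.isIn "## Related Skills" l
theorem pvClassify_eq_one_iff (l : String) : pvClassify l = 1 ↔ pvMarker l = true := by
  unfold pvClassify pvMarker
  split_ifs with h1 h2 <;> simp_all
theorem pvClassify_marker (l : String) (h : pvMarker l = true) : pvClassify l = 1 :=
  (pvClassify_eq_one_iff l).mpr h
theorem pvLoopA_true (ls : List String) : ∀ acc,
    pvLoopA ls true acc = acc ++ ls.takeWhile (fun l => !(pvClassify l == -1)) := by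
  induction ls with
  | nil => intro acc; simp [pvLoopA]
  | cons l ls ih =>
    intro acc
    by_cases hm : pvMarker l = true
    · have hc : pvClassify l = 1 := pvClassify_marker l hm
      unfold pvMarker at hm
      rw [List.takeWhile_cons, hc]
      simp only [pvLoopA, hm, if_true, ih]
      simp
    · by_cases hb : (PySem.Str.strip l == "" || PySem.Str.startswith l "##") = true
      · have hc : pvClassify l = -1 := by
          unfold pvClassify
          rw [if_neg, if_pos]
          · simpa using hb
          · simpa [pvMarker] using hm
        rw [List.takeWhile_cons, hc]
        unfold pvMarker at hm
        simp only [pvLoopA, Bool.true_and]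
        rw [if_neg (by simpa using hm), if_pos]
        · simp
        · rw [Bool.or_comm] at hb; simpa using hb
      · have hc : pvClassify l = 0 := by
          unfold pvClassify
          rw [if_neg, if_neg]
          · simpa using hb
          · simpa [pvMarker] using hm
        rw [List.takeWhile_cons, hc]
        unfold pvMarker at hm
        simp only [pvLoopA, Bool.true_and]
        rw [if_neg (by simpa using hm), if_neg]
        · simp [ih]
        · rw [Bool.or_comm] at hb; simpa using hb
def pvFindMarker : List String → Option (String × List String)
  | [] => none
  | l :: ls => if pvMarker l then some (l, ls) else pvFindMarker ls
theorem pvLoopA_false (ls : List String) :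
    pvLoopA ls false [] =
      (match pvFindMarker ls with
       | none => []
       | some (l, rest) => l :: rest.takeWhile (fun l => !(pvClassify l == -1))) := by
  induction ls with
  | nil => rfl
  | cons l ls ih =>
    simp only [pvFindMarker]
    by_cases hm : pvMarker l = true
    · have hm' := hm
      unfold pvMarker at hm'
      simp only [pvLoopA, hm', if_true]
      rw [show ([] ++ [l] : List String) = [l] from rfl, pvLoopA_true ls [l]]
      simp [hm]
    · have hm' := hm
      unfold pvMarker at hm'
      simp only [pvLoopA]
      rw [if_neg (by simpa using hm'), if_neg (by simp), if_neg (by simp), ih]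
      simp [hm]
theorem pvFindMarker_none (ls : List String) (h : ∀ l ∈ ls, pvClassify l ≠ 1) :
    pvFindMarker ls = none := by
  induction ls with
  | nil => rfl
  | cons l ls ih =>
    have hm : pvMarker l = false := by
      by_contra hc
      exact h l (by simp) (pvClassify_marker l (by simpa using hc))
    simp only [pvFindMarker, hm, Bool.false_eq_true, if_false]
    exact ih (fun x hx => h x (by simp [hx]))
theorem pvFindMarker_append (pre : List String) (l : String) (suf : List String)
    (hpre : ∀ x ∈ pre, pvClassify x ≠ 1) (hl : pvClassify l = 1) :
    pvFindMarker (pre ++ l :: suf) = some (l, suf) := by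
  induction pre with
  | nil =>
    have h1 : pvMarker l = true := (pvClassify_eq_one_iff l).mp hl
    simp [pvFindMarker, h1]
  | cons x pre ih =>
    have hm : pvMarker x = false := by
      by_contra hc
      exact hpre x (by simp) (pvClassify_marker x (by simpa using hc))
    simp only [List.cons_append, pvFindMarker, hm, Bool.false_eq_true, if_false]
    exact ih (fun y hy => hpre y (by simp [hy]))
theorem pvIndexNeg_takeWhile (ls : List String) :
    (match PySem.List.index? (ls.map pvClassify) (-1) with
     | some j => ls.take j
     | none => ls) = ls.takeWhile (fun l => !(pvClassify l == -1)) := by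
  induction ls with
  | nil => simp [PySem.List.index?]
  | cons l ls ih =>
    by_cases h : pvClassify l = -1
    · rw [List.map_cons, h, PySem.List.index?_cons_self]
      simp [h]
    · rw [List.map_cons, PySem.List.index?_cons_of_ne _ h]
      cases hj : PySem.List.index? (ls.map pvClassify) (-1) with
      | none =>
        rw [hj] at ih
        simp [h, ← ih]
      | some j =>
        rw [hj] at ih
        simp [h, ← ih]

-- ===== VERDICT (by name: the statement is the Claim_ definition above) =====
theorem find_reference_section_py_spec : Claim_equal_find_reference_section_py := by
  intro content _
  unfold Spec_find_reference_section_py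
  unfold find_reference_section_py find_reference_section_py_alt
  dsimp only
  generalize (PySem.Str.split? content "\n").getD [] = lines
  cases hidx : PySem.List.index? (lines.map pvClassify) 1 with
  | none =>
    have hnone : ∀ l ∈ lines, pvClassify l ≠ 1 := by
      intro l hl hc
      have hmem : (1 : Int) ∈ lines.map pvClassify := List.mem_map.mpr ⟨l, hl, hc⟩
      rw [← PySem.List.index?_isSome_iff, hidx] at hmem
      simp at hmem
    rw [pvLoopA_false, pvFindMarker_none lines hnone]
    rfl
  | some start =>
    obtain ⟨pre, suf, htags, hlen, hnot⟩ := (PySem.List.index?_eq_some_iff _ _ _).mp hidx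
    obtain ⟨preL, rest', hsplit, hpreL, hrest⟩ := List.map_eq_append_iff.mp htags
    obtain ⟨l, sufL, hrest2, hcl, hsufL⟩ := List.map_eq_cons_iff.mp hrest
    subst hrest2
    have hpreN : ∀ x ∈ preL, pvClassify x ≠ 1 := by
      intro x hx hc
      exact hnot (hpreL ▸ List.mem_map.mpr ⟨x, hx, hc⟩)
    have hfind : pvFindMarker lines = some (l, sufL) := by
      rw [hsplit]; exact pvFindMarker_append preL l sufL hpreN hcl
    have hlenL : preL.length = start := by
      rw [← hlen, ← hpreL, List.length_map]
    rw [pvLoopA_false, hfind]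
    dsimp only
    simp only [List.isEmpty_cons, Bool.false_eq_true, if_false]
    have hdrop1 : PySem.List.slice (lines.map pvClassify) (some ((start : Int) + 1)) none
        = sufL.map pvClassify := by
      rw [show ((start : Int) + 1) = ((start + 1 : Nat) : Int) by push_cast; ring]
      rw [PySem.List.slice_from_natCast, hsplit, List.map_append, List.map_cons,
        List.drop_append]
      rw [List.drop_eq_nil_of_le (by simp [hlenL]),
        show start + 1 - (List.map pvClassify preL).length = 1 by simp [hlenL]]
      simp
    rw [hdrop1]
    have hdropStart : lines.drop start = l :: sufL := by
      rw [hsplit, ← hlenL, List.drop_left]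
    cases hj : PySem.List.index? (sufL.map pvClassify) (-1) with
    | none =>
      have htw : sufL.takeWhile (fun l => !(pvClassify l == -1)) = sufL := by
        have h5 := pvIndexNeg_takeWhile sufL
        rw [hj] at h5
        exact h5.symm
      rw [htw]
      dsimp only
      rw [Int.ofNat_eq_natCast, PySem.List.slice_natCast, hdropStart]
      have hle : lines.length - start = sufL.length + 1 := by
        rw [hsplit, ← hlenL]
        simp
      rw [hle, List.take_of_length_le (by simp)]
    | some j =>
      have htw : sufL.takeWhile (fun l => !(pvClassify l == -1)) = sufL.take j := by
        have h5 := pvIndexNeg_takeWhile sufL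
        rw [hj] at h5
        exact h5.symm
      rw [htw]
      dsimp only
      rw [Int.ofNat_eq_natCast, PySem.List.slice_natCast, hdropStart]
      rw [show start + 1 + j - start = j + 1 by omega]
      simp
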